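-- pv_equiv track=rewrite | github.com/GusW/python_main | study/search_sort/examples.py | solution
-- ===== SOURCE A (Python) =====
-- def solution(A, B):
--     res = ''
--     major, majorLetter = (range(A), 'a') if A > B else (range(B), 'b')
--     minor, minorLetter = (range(B), 'b') if majorLetter == 'a' else (range(A), 'a')
--     while len(major) or len(minor):
--         for i in major:
--             if i < 2:
--                 res += majorLetter
--                 major = range(len(major)-1)
--             else:
--                 i = 1
--                 break
--
--         for j in minor:
--             if j < 2:
--                 res += minorLetter
--                 minor = range(len(minor)-1)
--             else:
--                 j = 1
--                 break
--
--     return res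
-- ===== SOURCE B (Python) =====
-- def solution(A, B):
--     # Closed form: the loop's output is t full "major2+minor2" blocks, then
--     # one last interleaved round, then the leftover majority letters contiguously.
--     mc, ml, nc, nl = (A, 'a', B, 'b') if A > B else (B, 'b', A, 'a')
--     mc, nc = max(mc, 0), max(nc, 0)
--     t = nc // 2
--     k = min(2, mc - 2 * t)
--     return (ml * 2 + nl * 2) * t + ml * k + nl * (nc - 2 * t) + ml * (mc - 2 * t - k)
-- ===== Notes on version B (the rewrite author's own statement) =====
-- stated objective: faster
-- what changed: Replaces A's round-by-round while loop (with break-driven inner for-loops over mutated range objects) by a loop-free closed form: t = minor//2 full 'major*2+minor*2' blocks, one last interleaved round, then the leftover majority letters appended contiguously.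
import Mathlib
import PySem

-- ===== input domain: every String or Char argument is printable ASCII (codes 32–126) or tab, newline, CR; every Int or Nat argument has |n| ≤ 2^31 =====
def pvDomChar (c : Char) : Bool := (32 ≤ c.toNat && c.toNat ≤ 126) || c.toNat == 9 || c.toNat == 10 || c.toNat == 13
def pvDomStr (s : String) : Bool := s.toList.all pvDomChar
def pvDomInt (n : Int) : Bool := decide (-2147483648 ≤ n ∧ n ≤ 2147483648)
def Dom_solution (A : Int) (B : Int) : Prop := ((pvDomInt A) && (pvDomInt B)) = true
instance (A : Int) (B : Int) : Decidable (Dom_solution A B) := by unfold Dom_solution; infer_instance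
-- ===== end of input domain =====

-- B replaces A's round-by-round while loop by a loop-free closed form:
-- t full "major²minor²" blocks, one last interleaved round, then the leftover
-- majority letters contiguously; objective: faster (O(1) Python-level string ops, measured faster in a timing run).

-- ===== PORT A =====
-- 'for i in major: if i < 2: res += letter; major = range(len(major)-1) else: i = 1; break'
-- major is a range(len); we carry its length as an Int and iterate the ORIGINAL range list.
def pvForA : List Int → List Char → Char → Int → List Char × Int
  | [], res, _, len => (res, len)
  | i :: rest, res, c, len =>
      if i < 2 then pvForA rest (res ++ [c]) c (len - 1)
      else (res, len)   -- break

-- 'while len(major) or len(minor): <for over major> ; <for over minor>'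
-- The first Nat argument is a fuel guard making the recursion structural; solution passes
-- A.toNat + B.toNat + 1, enough for every iteration (each pass shrinks a positive length),
-- so the fuel-0 branch is never reached and the loop is the Python while loop step for step.
def pvWhileA : Nat → Int → Int → List Char → Char → Char → List Char
  | 0, _, _, res, _, _ => res
  | Nat.succ fuel, m, n, res, mc, nc =>
    if 0 < m ∨ 0 < n then
      pvWhileA fuel (pvForA (PySem.List.pyRange 0 m 1) res mc m).2
               (pvForA (PySem.List.pyRange 0 n 1) (pvForA (PySem.List.pyRange 0 m 1) res mc m).1 nc n).2
               (pvForA (PySem.List.pyRange 0 n 1) (pvForA (PySem.List.pyRange 0 m 1) res mc m).1 nc n).1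
               mc nc
    else res

def solution (A : Int) (B : Int) : String :=
  let mj := if A > B then ((A : Int), 'a') else (B, 'b')
  let mi := if mj.2 = 'a' then ((B : Int), 'b') else (A, 'a')
  String.ofList (pvWhileA (mj.1.toNat + mi.1.toNat + 1) mj.1 mi.1 [] mj.2 mi.2)

-- ===== PORT B =====
-- Source B: t = nc//2; k = min(2, mc-2t);
-- return (ml*2+nl*2)*t + ml*k + nl*(nc-2t) + ml*(mc-2t-k)   (string*n → List.replicate)
def solution_alt (A : Int) (B : Int) : String :=
  let q := if A > B then ((A : Int), 'a', (B : Int), 'b') else (B, 'b', A, 'a')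
  let mc := max q.1 0
  let nc := max q.2.2.1 0
  let t := PySem.Int.floordiv nc 2
  let k := min 2 (mc - 2 * t)
  String.ofList
    ((List.replicate t.toNat (List.replicate 2 q.2.1 ++ List.replicate 2 q.2.2.2)).flatten
      ++ List.replicate k.toNat q.2.1
      ++ List.replicate (nc - 2 * t).toNat q.2.2.2
      ++ List.replicate (mc - 2 * t - k).toNat q.2.1)

-- ===== PRECONDITION & SPEC =====
def Spec_solution (A : Int) (B : Int) (out : String) : Prop := out = solution_alt A B
instance (A : Int) (B : Int) (out : String) : Decidable (Spec_solution A B out) := by unfold Spec_solution; infer_instance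

-- ===== CLAIM (what is proved, stated in full; the proofs are below) =====
def Claim_equal_solution : Prop := ∀ (A : Int) (B : Int), Dom_solution A B → Spec_solution A B (solution A B)

-- ===== LEMMAS AND PROOFS =====

-- proof-side closed form over Nats (what both sides are reduced to)
def CF (M N : Nat) (mc nc : Char) : List Char :=
  (List.replicate (N / 2) (List.replicate 2 mc ++ List.replicate 2 nc)).flatten
    ++ List.replicate (min 2 (M - 2 * (N / 2))) mc
    ++ List.replicate (N - 2 * (N / 2)) nc
    ++ List.replicate (M - 2 * (N / 2) - min 2 (M - 2 * (N / 2))) mc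

-- one inner for-pass of A appends min(len,2) letters and shrinks the range's length accordingly
theorem pvForA_range (m : Int) (res : List Char) (c : Char) :
    pvForA (PySem.List.pyRange 0 m 1) res c m =
      if m ≤ 0 then (res, m)
      else (res ++ List.replicate (min m 2).toNat c, m - min m 2) := by
  rcases lt_trichotomy m 1 with h | h | h
  · rw [PySem.List.pyRange_one_eq_nil (by omega)]
    simp [pvForA, show m ≤ 0 by omega]
  · subst h
    rw [PySem.List.pyRange_one_cons (by norm_num), PySem.List.pyRange_one_eq_nil (by norm_num)]
    norm_num [pvForA]
  · rw [PySem.List.pyRange_one_cons (by omega), PySem.List.pyRange_one_cons (by omega)]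
    rcases lt_trichotomy m 2 with h2 | h2 | h2
    · omega
    · subst h2
      rw [PySem.List.pyRange_one_eq_nil (by norm_num)]
      norm_num [pvForA]
      rfl
    · rw [PySem.List.pyRange_one_cons (by omega)]
      have hm2 : min m 2 = 2 := by omega
      simp [pvForA, show ¬ m ≤ 0 by omega, hm2, List.append_assoc,
        show (2:Int).toNat = 2 from rfl]
      omega

-- CF satisfies A's per-round recurrence
theorem CF_step (M N : Nat) (mc nc : Char) (hNM : N ≤ M) (hM : 0 < M) :
    CF M N mc nc =
      List.replicate (min 2 M) mc ++ List.replicate (min 2 N) nc ++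
        CF (M - min 2 M) (N - min 2 N) mc nc := by
  by_cases h2 : 2 ≤ N
  · have e1 : min 2 M = 2 := by omega
    have e2 : min 2 N = 2 := by omega
    have e3 : N / 2 = (N - 2) / 2 + 1 := by omega
    have e4 : (M - 2) - 2 * ((N - 2) / 2) = M - 2 * (N / 2) := by omega
    have e5 : (N - 2) - 2 * ((N - 2) / 2) = N - 2 * (N / 2) := by omega
    rw [e1, e2]
    unfold CF
    rw [e3, e4, e5, List.replicate_succ, List.flatten_cons]
    simp only [List.append_assoc, List.append_cancel_left_eq]
    rw [← e3]
  · have e1 : min 2 N = N := by omega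
    have e2 : N / 2 = 0 := by omega
    have e3 : (N - N) / 2 = 0 := by omega
    rw [e1]
    unfold CF
    rw [e2, e3]
    simp only [Nat.sub_self, Nat.mul_zero, Nat.sub_zero, List.replicate_zero,
      List.flatten_nil, List.nil_append, List.append_nil]
    rw [show List.replicate (M - min 2 M) mc =
        List.replicate (min 2 (M - min 2 M)) mc ++
          List.replicate (M - min 2 M - min 2 (M - min 2 M)) mc by
      rw [← List.replicate_add]; congr 1; omega]

theorem CF_zero (mc nc : Char) : CF 0 0 mc nc = [] := by
  simp [CF]

-- A's while loop computes the closed form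
theorem pvWhile_eq_CF (fa : Nat) (m n : Int) (res : List Char) (mc nc : Char)
    (ha : (max m 0).toNat + (max n 0).toNat < fa) (hnm : n ≤ m) :
    pvWhileA fa m n res mc nc = res ++ CF (max m 0).toNat (max n 0).toNat mc nc := by
  induction fa generalizing m n res with
  | zero => omega
  | succ fa ih =>
    simp only [pvWhileA]
    split_ifs with h
    · simp only [pvForA_range]
      split_ifs with hm hn hn
      · omega
      · omega
      · -- m > 0, n ≤ 0
        rw [ih (m - min m 2) n (res ++ List.replicate (min m 2).toNat mc) (by omega) (by omega)]
        rw [CF_step ((max m 0).toNat) ((max n 0).toNat) mc nc (by omega) (by omega)]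
        have e1 : min 2 (max m 0).toNat = (min m 2).toNat := by omega
        have e2 : min 2 (max n 0).toNat = 0 := by omega
        have e3 : (max (m - min m 2) 0).toNat = (max m 0).toNat - min 2 (max m 0).toNat := by omega
        have e4 : (max n 0).toNat = (max n 0).toNat - min 2 (max n 0).toNat := by omega
        rw [e3, ← e4, e1, e2]
        simp [List.append_assoc]
      · -- m > 0, n > 0
        rw [ih (m - min m 2) (n - min n 2)
          (res ++ List.replicate (min m 2).toNat mc ++ List.replicate (min n 2).toNat nc)
          (by omega) (by omega)]
        rw [CF_step ((max m 0).toNat) ((max n 0).toNat) mc nc (by omega) (by omega)]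
        have e1 : min 2 (max m 0).toNat = (min m 2).toNat := by omega
        have e2 : min 2 (max n 0).toNat = (min n 2).toNat := by omega
        have e3 : (max (m - min m 2) 0).toNat = (max m 0).toNat - min 2 (max m 0).toNat := by omega
        have e4 : (max (n - min n 2) 0).toNat = (max n 0).toNat - min 2 (max n 0).toNat := by omega
        rw [e3, e4, e1, e2]
        simp [List.append_assoc]
    · have hm0 : (max m 0).toNat = 0 := by omega
      have hn0 : (max n 0).toNat = 0 := by omega
      rw [hm0, hn0, CF_zero]
      simp

-- B's closed-form expression (over Ints) is CF
theorem alt_eq_CF (mc nc : Int) (h0 : 0 ≤ nc) (h1 : nc ≤ mc) (ml nl : Char) :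
    ((List.replicate (PySem.Int.floordiv nc 2).toNat
        (List.replicate 2 ml ++ List.replicate 2 nl)).flatten
      ++ List.replicate (min 2 (mc - 2 * PySem.Int.floordiv nc 2)).toNat ml
      ++ List.replicate (nc - 2 * PySem.Int.floordiv nc 2).toNat nl
      ++ List.replicate (mc - 2 * PySem.Int.floordiv nc 2 - min 2 (mc - 2 * PySem.Int.floordiv nc 2)).toNat ml)
    = CF mc.toNat nc.toNat ml nl := by
  rw [PySem.Int.floordiv_eq_ediv_of_pos (by norm_num)]
  have e1 : (nc / 2).toNat = nc.toNat / 2 := by omega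
  have e2 : (min 2 (mc - 2 * (nc / 2))).toNat = min 2 (mc.toNat - 2 * (nc.toNat / 2)) := by omega
  have e3 : (nc - 2 * (nc / 2)).toNat = nc.toNat - 2 * (nc.toNat / 2) := by omega
  have e4 : (mc - 2 * (nc / 2) - min 2 (mc - 2 * (nc / 2))).toNat =
      mc.toNat - 2 * (nc.toNat / 2) - min 2 (mc.toNat - 2 * (nc.toNat / 2)) := by omega
  rw [e1, e2, e3, e4]
  rfl

-- ===== VERDICT (by name: the statement is the Claim_ definition above) =====
theorem solution_spec : Claim_equal_solution := by
  intro A B _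
  unfold Spec_solution solution solution_alt
  by_cases hAB : A > B
  · simp only [hAB, reduceIte]
    rw [pvWhile_eq_CF (A.toNat + B.toNat + 1) A B [] 'a' 'b' (by omega) (by omega)]
    rw [← alt_eq_CF (max A 0) (max B 0) (by omega) (by omega) 'a' 'b']
    congr 1
  · simp only [hAB, reduceIte, show (('b':Char) = 'a') = False by simp]
    rw [pvWhile_eq_CF (B.toNat + A.toNat + 1) B A [] 'b' 'a' (by omega) (by omega)]
    rw [← alt_eq_CF (max B 0) (max A 0) (by omega) (by omega) 'b' 'a']
    congr 1
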